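-- pv_equiv track=rewrite | github.com/SimonHONGTENG/Demo | word_ladder.py | checkWord
-- ===== SOURCE A (Python) =====
-- def checkWord(s):  # 检查是不是单词
--     try:
--         for i in s:
--             if not ((65 <= ord(i) <= 90) or (97 <= ord(i) <= 122)):  # ascii a-z 和 A-Z 的范围
--                 return True
--         return False
--     except:
--         return True
-- ===== SOURCE B (Python) =====
-- def checkWord(s):  # True iff s contains a character outside A-Z/a-z (or is not iterable/char-like)
--     try:
--         return bool(set(s) - set("ABCDEFGHIJKLMNOPQRSTUVWXYZabcdefghijklmnopqrstuvwxyz"))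
--     except:
--         return True
-- ===== Notes on version B (the rewrite author's own statement) =====
-- stated objective: simpler
-- what changed: Replaces the early-exit per-character loop with its ASCII-range branch by a single set difference: distinct characters of s minus the literal alphabet set, returning its non-emptiness.
import Mathlib
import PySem

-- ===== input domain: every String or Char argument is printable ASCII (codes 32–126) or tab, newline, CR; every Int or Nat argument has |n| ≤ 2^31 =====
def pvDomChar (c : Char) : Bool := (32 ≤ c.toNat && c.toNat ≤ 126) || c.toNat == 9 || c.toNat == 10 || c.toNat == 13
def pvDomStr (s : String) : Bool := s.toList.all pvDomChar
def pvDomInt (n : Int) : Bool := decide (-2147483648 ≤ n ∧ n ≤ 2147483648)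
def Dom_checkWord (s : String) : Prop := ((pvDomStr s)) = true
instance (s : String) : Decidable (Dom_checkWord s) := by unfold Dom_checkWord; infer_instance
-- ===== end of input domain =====

-- B replaces A's early-exit per-character loop (with its ASCII-range branch) by one
-- set difference: distinct characters of s minus the literal alphabet set; objective: simpler.

-- ===== PORT A =====
-- the 'for i in s: if … return True / return False' loop, as structural recursion with early exit
def checkWordLoop : List Char → Bool
  | [] => false
  | i :: rest =>
    if !((65 ≤ i.toNat && i.toNat ≤ 90) || (97 ≤ i.toNat && i.toNat ≤ 122)) then true
    else checkWordLoop rest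

def checkWord (s : String) : Bool := checkWordLoop s.toList

-- ===== PORT B =====
-- bool(set(s) - set("A…Za…z"))
def checkWordAllowed : PySem.Set Char :=
  PySem.Set.ofList "ABCDEFGHIJKLMNOPQRSTUVWXYZabcdefghijklmnopqrstuvwxyz".toList

def checkWord_alt (s : String) : Bool :=
  decide (PySem.Set.diff (PySem.Set.ofList s.toList) checkWordAllowed ≠ [])

-- ===== PRECONDITION & SPEC =====
def Spec_checkWord (s : String) (out : Bool) : Prop := out = checkWord_alt s
instance (s : String) (out : Bool) : Decidable (Spec_checkWord s out) := by unfold Spec_checkWord; infer_instance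

-- ===== CLAIM (what is proved, stated in full; the proofs are below) =====
def Claim_equal_checkWord : Prop := ∀ (s : String), Dom_checkWord s → Spec_checkWord s (checkWord s)

-- ===== LEMMAS AND PROOFS =====

def checkWordOk (i : Char) : Bool :=
  (65 ≤ i.toNat && i.toNat ≤ 90) || (97 ≤ i.toNat && i.toNat ≤ 122)

theorem checkWordLoop_eq_any (l : List Char) :
    checkWordLoop l = l.any (fun i => !checkWordOk i) := by
  induction l with
  | nil => rfl
  | cons i rest ih =>
    change (if !checkWordOk i then true else checkWordLoop rest) = _
    cases h : checkWordOk i <;> simp [List.any_cons, h, ih]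

theorem checkWord_contains_eq (c : Char) (hd : pvDomChar c = true) :
    PySem.Set.contains checkWordAllowed c = checkWordOk c := by
  have hlt : c.toNat < 127 := by
    simp only [pvDomChar, Bool.or_eq_true, Bool.and_eq_true, decide_eq_true_eq, beq_iff_eq] at hd
    omega
  have key : ∀ n, n < 127 →
      PySem.Set.contains checkWordAllowed (Char.ofNat n) = checkWordOk (Char.ofNat n) := by
    set_option maxRecDepth 4000 in decide
  have h := key c.toNat hlt
  rwa [Char.ofNat_toNat] at h

theorem checkWord_spec : Claim_equal_checkWord := by
  intro s hdom
  unfold Spec_checkWord checkWord checkWord_alt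
  rw [checkWordLoop_eq_any]
  have hdom' : ∀ c ∈ s.toList, pvDomChar c = true := by
    simpa [Dom_checkWord, pvDomStr, List.all_eq_true] using hdom
  have hall : ∀ c ∈ s.toList, (c ∈ checkWordAllowed ↔ checkWordOk c = true) := by
    intro c hc
    rw [← PySem.Set.contains_iff, checkWord_contains_eq c (hdom' c hc)]
  rw [Bool.eq_iff_iff]
  simp only [List.any_eq_true, Bool.not_eq_eq_eq_not, Bool.not_true, decide_eq_true_eq, ne_eq,
    List.eq_nil_iff_forall_not_mem, not_forall, not_not, PySem.Set.mem_diff, PySem.Set.mem_ofList]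
  constructor
  · rintro ⟨c, hc, hbad⟩
    exact ⟨c, hc, fun hmem => by simp [(hall c hc).1 hmem] at hbad⟩
  · rintro ⟨c, hc, hnot⟩
    refine ⟨c, hc, ?_⟩
    cases h : checkWordOk c
    · rfl
    · exact absurd ((hall c hc).2 h) hnot
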